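-- pv_equiv track=rewrite | github.com/mdrahmed/Graphs | backwardTracking/combinedGraph/longestCommonSubsequence/step1/updated_data/remove_patterns.py | remove_patterns
-- ===== SOURCE A (Python) =====
-- def are_same_lists(a, b) -> bool:
--     '''
--     if 2 lists are same
--     '''
--     if len(a) != len(b):
--         return False
--     for i in range(len(a)):
--         if a[i] != b[i]:
--             return False
--     return True
--
-- def find_pattern(text: list, pattern: list):
--     '''
--     find the pattern in a file.
--     parameters:
--     - text: a list of string, the file content
--     - pattern: a list of string, the pattern
--     '''
--     res = []
--     length = len(pattern)
--     i = 0
--     while i < len(text)-length+1: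
--         if are_same_lists(text[i:i+length], pattern):
--             res.append([i, i+length])
--             i += length
--         else:
--             i += 1
--     return res
--
-- def remove_patterns(text: list, patterns: list):
--     sorted_patterns = sorted(patterns, key=len, reverse=True)
--     found_indices = []
--     for pattern in sorted_patterns:
--         indices = find_pattern(text, pattern)
--         if len(indices) > 0:
--             found_indices += indices
--     removing_indices = []
--     for index_tuple in found_indices:
--         removing_indices += list(range(index_tuple[0], index_tuple[1]))
--     remaining_indices = []
--     output_text = []
--     for i in range(len(text)):
--         if i not in removing_indices:
--             remaining_indices.append(i)
--             output_text.append(text[i])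
--     return output_text, found_indices
-- ===== SOURCE B (Python) =====
-- def remove_patterns(text: list, patterns: list):
--     n = len(text)
--     # inverted index: token -> all positions in text, built once
--     index = {}
--     for i, tok in enumerate(text):
--         index.setdefault(tok, []).append(i)
--     found = []
--     for pattern in sorted(patterns, key=len, reverse=True):
--         m = len(pattern)
--         # occurrence starts = intersection of the shifted position sets of each token
--         cand = set(index.get(pattern[0], []))
--         for j in range(1, m):
--             cand &= {i - j for i in index.get(pattern[j], [])}
--         # greedy left-to-right pick of non-overlapping occurrences
--         nf = 0
--         for i in sorted(cand):
--             if i >= nf: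
--                 found.append([i, i + m])
--                 nf = i + m
--     keep = [True] * n
--     for a, b in found:
--         for i in range(a, b):
--             keep[i] = False
--     return [tok for tok, k in zip(text, keep) if k], found
-- ===== Notes on version B (the rewrite author's own statement) =====
-- stated objective: faster
-- what changed: B builds a token-to-positions inverted index over the text once and finds each pattern's occurrence starts as the intersection of the shifted position sets of its tokens (no sliding-window slice comparison), then picks non-overlapping starts greedily and compresses the text through a boolean keep-mask instead of rescanning A's flattened removing-indices list for every position.
import Mathlib
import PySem

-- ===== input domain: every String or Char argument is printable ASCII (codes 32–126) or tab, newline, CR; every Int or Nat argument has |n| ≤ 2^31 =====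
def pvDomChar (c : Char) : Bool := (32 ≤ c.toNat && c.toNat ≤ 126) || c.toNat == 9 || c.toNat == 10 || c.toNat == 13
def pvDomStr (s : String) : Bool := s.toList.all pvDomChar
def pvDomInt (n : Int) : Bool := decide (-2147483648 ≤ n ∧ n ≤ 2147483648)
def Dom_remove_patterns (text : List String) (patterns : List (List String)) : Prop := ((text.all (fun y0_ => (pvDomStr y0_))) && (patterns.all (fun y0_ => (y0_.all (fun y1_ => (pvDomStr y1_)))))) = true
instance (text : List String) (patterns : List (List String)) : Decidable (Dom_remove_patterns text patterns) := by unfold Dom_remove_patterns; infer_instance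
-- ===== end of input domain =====

-- B finds each pattern's occurrence starts by intersecting shifted position sets taken from a
-- token→positions inverted index built once, instead of A's sliding-window slice comparison, and
-- compresses the text through a boolean keep-mask instead of rescanning a flattened index list;
-- return values proved equal wherever A terminates.

-- ===== PORT A =====
def are_same_lists (a b : List String) : Bool :=
  if a.length != b.length then false
  else (PySem.List.pyRange 0 (a.length : Int) 1).all (fun i =>
    -- a[i] != b[i]: i is always in range here, so pyGetD is exact
    PySem.List.pyGetD a i "" == PySem.List.pyGetD b i "")

-- the 'while i < len(text)-length+1' loop of find_pattern; the fuel only makes it total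
-- (for length ≥ 1 each step increases i by ≥ 1, so fuel len(text)+1 is never exhausted)
def find_loop (text pattern : List String) (length : Int) (i : Int) : Nat → List (List Int)
  | 0 => []
  | fuel+1 =>
    if i < (text.length : Int) - length + 1 then
      if are_same_lists (PySem.List.slice text (some i) (some (i + length))) pattern then
        [i, i + length] :: find_loop text pattern length (i + length) fuel
      else
        find_loop text pattern length (i + 1) fuel
    else []

def find_pattern (text pattern : List String) : List (List Int) :=
  find_loop text pattern (pattern.length : Int) 0 (text.length + 1)

def remove_patterns (text : List String) (patterns : List (List String)) : List String × List (List Int) :=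
  let sorted_patterns := PySem.List.sorted patterns (fun p => (p.length : Int)) true
  let found_indices := sorted_patterns.foldl (fun acc pattern =>
    let indices := find_pattern text pattern
    if indices.length > 0 then acc ++ indices else acc) []
  let removing_indices : List Int := found_indices.foldl (fun acc it =>
    acc ++ PySem.List.pyRange (PySem.List.pyGetD it 0 0) (PySem.List.pyGetD it 1 0) 1) []
  -- the loop also builds remaining_indices (st.1), which A never returns
  let st := (PySem.List.pyRange 0 (text.length : Int) 1).foldl
    (fun (st : List Int × List String) i =>
      if !(removing_indices.contains i) then
        (st.1 ++ [i], st.2 ++ [PySem.List.pyGetD text i ""])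
      else st) ([], [])
  (st.2, found_indices)

-- ===== PORT B =====
def remove_patterns_alt (text : List String) (patterns : List (List String)) : List String × List (List Int) :=
  let n : Int := text.length
  -- index.setdefault(tok, []).append(i) over enumerate(text)
  let index : PySem.Dict String (List Int) :=
    (PySem.List.enumerate text 0).foldl
      (fun d p => PySem.Dict.modify d p.2 ([] : List Int) (· ++ [p.1])) PySem.Dict.empty
  let found := (PySem.List.sorted patterns (fun p => (p.length : Int)) true).foldl
    (fun (found : List (List Int)) pattern =>
      let m : Int := pattern.length
      -- pattern[0] / pattern[j] are in range for the nonempty patterns Pre_ admits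
      let cand : PySem.Set Int :=
        (PySem.List.pyRange 1 m 1).foldl
          (fun cand j => PySem.Set.inter cand
            (PySem.Set.ofList ((index.getD (PySem.List.pyGetD pattern j "") []).map (· - j))))
          (PySem.Set.ofList (index.getD (PySem.List.pyGetD pattern 0 "") []))
      ((PySem.List.sorted cand (fun x => x) false).foldl
        (fun (st : List (List Int) × Int) i =>
          if st.2 ≤ i then (st.1 ++ [[i, i + m]], i + m) else st) (found, 0)).1) []
  -- keep[i] = False; exact for 0 ≤ i < n, which holds for every removed index B produces
  let keep : List Bool := found.foldl (fun keep it =>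
    match it with
    | [a, b] => (PySem.List.pyRange a b 1).foldl (fun kp i => kp.set i.toNat false) keep
    | _ => keep) (List.replicate n.toNat true)   -- 'for a, b in found' (every element is a pair [a, b])
  (((text.zip keep).filter (·.2)).map (·.1), found)

-- ===== PRECONDITION & SPEC =====
-- Pre_ excludes an empty pattern among the patterns: there A's find_pattern loop never advances
-- (i += 0) and A diverges; B raises IndexError on pattern[0].
def Pre_remove_patterns (text : List String) (patterns : List (List String)) : Prop :=
  [] ∉ patterns
instance (text : List String) (patterns : List (List String)) : Decidable (Pre_remove_patterns text patterns) := by unfold Pre_remove_patterns; infer_instance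

def pvWitness_remove_patterns : List String × List (List String) :=
  (["a", "b", "a", "b", "c"], [["a", "b"], ["c"]])

def Spec_remove_patterns (text : List String) (patterns : List (List String)) (out : List String × List (List Int)) : Prop := out = remove_patterns_alt text patterns
instance (text : List String) (patterns : List (List String)) (out : List String × List (List Int)) : Decidable (Spec_remove_patterns text patterns out) := by unfold Spec_remove_patterns; infer_instance

-- ===== CLAIM (what is proved, stated in full; the proofs are below) =====
def Claim_equal_remove_patterns : Prop := ∀ (text : List String) (patterns : List (List String)), Dom_remove_patterns text patterns → Pre_remove_patterns text patterns → Spec_remove_patterns text patterns (remove_patterns text patterns)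

-- ===== LEMMAS AND PROOFS =====

-- occurrence positions of pattern p in text from position j on
def occIdx (text p : List String) (j : Int) : List Int :=
  (PySem.List.pyRange j ((text.length : Int) - (p.length : Int) + 1) 1).filter
    (fun i => PySem.List.slice text (some i) (some (i + (p.length : Int))) == p)

-- the greedy non-overlap selection, as a plain recursion
def gsel (m : Int) (nf : Int) : List Int → List (List Int)
  | [] => []
  | i :: r => if nf ≤ i then [i, i + m] :: gsel m (i + m) r else gsel m nf r

-- A's element-by-element list comparison is list equality
theorem are_same_lists_eq (a b : List String) : are_same_lists a b = (a == b) := by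
  unfold are_same_lists
  by_cases h : a.length = b.length
  · rw [if_neg (by simp [h])]
    rw [Bool.eq_iff_iff]
    rw [PySem.List.pyRange_zero_natCast]
    simp only [List.all_eq_true, List.mem_map, List.mem_range, beq_iff_eq]
    constructor
    · intro hall
      apply List.ext_getElem h
      intro k h1 h2
      have := hall (k : Int) ⟨k, h1, rfl⟩
      simpa [PySem.List.pyGetD_natCast, List.getD_eq_getElem?_getD,
             List.getElem?_eq_getElem, h1, h2] using this
    · rintro rfl i ⟨k, hk, rfl⟩
      rfl
  · rw [if_pos (by simp [h])]
    symm; rw [beq_eq_false_iff_ne]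
    intro he; exact h (congrArg List.length he)

-- B's greedy fold only appends to its accumulator
theorem gsel_acc (m : Int) (l : List Int) (acc : List (List Int)) (nf : Int) :
    (l.foldl (fun (st : List (List Int) × Int) i =>
      if st.2 ≤ i then (st.1 ++ [[i, i + m]], i + m) else st) (acc, nf)).1 = acc ++ gsel m nf l := by
  induction l generalizing acc nf with
  | nil => simp [gsel]
  | cons i r ih =>
    simp only [List.foldl_cons, gsel]
    by_cases h : nf ≤ i
    · rw [if_pos h, if_pos h, ih]; simp
    · rw [if_neg h, if_neg h, ih]

-- the threshold is only compared: equal behaviour if every element answers the comparison alike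
theorem gsel_congr (m : Int) (nf nf' : Int) (l : List Int)
    (h : ∀ i ∈ l, (nf ≤ i ↔ nf' ≤ i)) : gsel m nf l = gsel m nf' l := by
  cases l with
  | nil => rfl
  | cons i r =>
    simp only [gsel]
    by_cases hi : nf ≤ i
    · rw [if_pos hi, if_pos ((h i (by simp)).1 hi)]
    · rw [if_neg hi, if_neg (fun c => hi ((h i (by simp)).2 c))]
      exact gsel_congr m nf nf' r (fun j hj => h j (by simp [hj]))

-- occurrences before the threshold are skipped by the greedy selection
theorem gsel_occIdx_skip (text p : List String) (nf : Int) :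
    ∀ (k : Nat) (j : Int), j + k = nf → gsel (p.length : Int) nf (occIdx text p j) = gsel (p.length : Int) nf (occIdx text p nf) := by
  intro k
  induction k with
  | zero => intro j hj; simp at hj; rw [hj]
  | succ k ih =>
    intro j hj
    have hjn : j < nf := by omega
    have step : gsel (p.length : Int) nf (occIdx text p j) = gsel (p.length : Int) nf (occIdx text p (j + 1)) := by
      unfold occIdx
      by_cases hb : j < (text.length : Int) - (p.length : Int) + 1
      · rw [PySem.List.pyRange_one_cons hb]
        simp only [List.filter_cons]
        by_cases ht : (PySem.List.slice text (some j) (some (j + (p.length : Int))) == p) = true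
        · rw [if_pos ht]
          simp only [gsel]
          rw [if_neg (by omega)]
        · rw [if_neg ht]
      · rw [PySem.List.pyRange_one_eq_nil (by omega), PySem.List.pyRange_one_eq_nil (by omega)]
    rw [step]; exact ih (j + 1) (by omega)

theorem mem_occIdx (text p : List String) (j i : Int) :
    i ∈ occIdx text p j ↔ (j ≤ i ∧ i < (text.length : Int) - (p.length : Int) + 1)
      ∧ PySem.List.slice text (some i) (some (i + (p.length : Int))) = p := by
  unfold occIdx
  rw [List.mem_filter, PySem.List.mem_pyRange_one, beq_iff_eq]

-- A's scan loop = find-all occurrences + greedy selection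
theorem find_loop_eq_gsel (text p : List String) (hp : p ≠ []) :
    ∀ (fuel : Nat) (i : Int), 0 ≤ i → (text.length : Int) + 1 ≤ i + fuel →
      find_loop text p (p.length : Int) i fuel = gsel (p.length : Int) i (occIdx text p i) := by
  have hm : (1 : Int) ≤ (p.length : Int) := by
    have : p.length ≠ 0 := fun h => hp (List.eq_nil_of_length_eq_zero h)
    omega
  intro fuel
  induction fuel with
  | zero =>
    intro i h0 hf
    simp only [find_loop]
    rw [occIdx, PySem.List.pyRange_one_eq_nil (by omega)]
    rfl
  | succ fuel ih =>
    intro i h0 hf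
    simp only [find_loop]
    by_cases hb : i < (text.length : Int) - (p.length : Int) + 1
    · rw [if_pos hb]
      rw [are_same_lists_eq]
      conv_rhs => rw [occIdx, PySem.List.pyRange_one_cons hb]
      rw [List.filter_cons]
      by_cases ht : (PySem.List.slice text (some i) (some (i + (p.length : Int))) == p) = true
      · simp only [ht, if_true]
        simp only [gsel, if_pos (le_refl i)]
        congr 1
        show find_loop text p (p.length : Int) (i + (p.length : Int)) fuel = gsel (p.length : Int) (i + (p.length : Int)) (occIdx text p (i + 1))
        rw [gsel_occIdx_skip text p (i + (p.length : Int)) (p.length - 1) (i + 1) (by omega)]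
        rw [ih (i + (p.length : Int)) (by omega) (by omega)]
      · simp only [if_neg ht]
        show find_loop text p (p.length : Int) (i + 1) fuel = gsel (p.length : Int) i (occIdx text p (i + 1))
        rw [gsel_congr (p.length : Int) i (i + 1) (occIdx text p (i + 1))
          (fun x hx => by
            have := ((mem_occIdx text p (i + 1) x).1 hx).1.1; omega)]
        exact ih (i + 1) (by omega) (by omega)
    · rw [if_neg hb]
      rw [occIdx, PySem.List.pyRange_one_eq_nil (by omega)]
      rfl

theorem find_pattern_eq (text p : List String) (hp : p ≠ []) :
    find_pattern text p = gsel (p.length : Int) 0 (occIdx text p 0) := by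
  unfold find_pattern
  exact find_loop_eq_gsel text p hp (text.length + 1) 0 le_rfl (by push_cast; omega)

-- === B's inverted index and intersection characterised ===

-- the index loop: positions of tok, in text order
theorem index_getD (text : List String) (tok : String) :
    (((PySem.List.enumerate text 0).foldl
      (fun d p => PySem.Dict.modify d p.2 ([] : List Int) (· ++ [p.1])) PySem.Dict.empty).getD tok [])
    = (PySem.List.pyRange 0 (text.length : Int) 1).filter (fun i => PySem.List.pyGetD text i "" == tok) := by
  rw [PySem.List.enumerate_eq_map_pyRange text "", List.foldl_map]
  have h1 : (PySem.List.pyRange 0 (PySem.List.len text) 1).foldl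
      (fun (d : PySem.Dict String (List Int)) j => PySem.Dict.modify d ((j, PySem.List.pyGetD text j "")).2 ([] : List Int) (· ++ [((j, PySem.List.pyGetD text j "")).1])) PySem.Dict.empty
    = ((PySem.List.pyRange 0 (PySem.List.len text) 1).map (fun j => (PySem.List.pyGetD text j "", j))).foldl
      (fun d p => PySem.Dict.modify d p.1 ([] : List Int) (· ++ [p.2])) PySem.Dict.empty := by
    rw [List.foldl_map]
  rw [h1, PySem.Dict.getD_foldl_modify_append]
  rw [List.filter_map, List.map_map]
  simp [Function.comp_def, PySem.List.len_eq]

theorem mem_index (text : List String) (tok : String) (i : Int) :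
    (i ∈ ((PySem.List.enumerate text 0).foldl
      (fun d p => PySem.Dict.modify d p.2 ([] : List Int) (· ++ [p.1])) PySem.Dict.empty).getD tok [])
    ↔ (0 ≤ i ∧ i < (text.length : Int) ∧ PySem.List.pyGetD text i "" = tok) := by
  rw [index_getD, List.mem_filter, PySem.List.mem_pyRange_one, beq_iff_eq]
  tauto

-- membership in an iterated set intersection
theorem mem_foldl_inter (g : Int → List Int) (l : List Int) (s0 : PySem.Set Int) (x : Int) :
    x ∈ l.foldl (fun s j => PySem.Set.inter s (g j)) s0 ↔ x ∈ s0 ∧ ∀ j ∈ l, x ∈ g j := by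
  induction l generalizing s0 with
  | nil => simp
  | cons a r ih =>
    simp only [List.foldl_cons, ih, PySem.Set.mem_inter, List.mem_cons]
    constructor
    · rintro ⟨⟨hs, hg⟩, hr⟩
      exact ⟨hs, fun j hj => hj.elim (fun e => e ▸ hg) (hr j)⟩
    · rintro ⟨hs, hall⟩
      exact ⟨⟨hs, hall a (Or.inl rfl)⟩, fun j hj => hall j (Or.inr hj)⟩

theorem nodup_foldl_inter (g : Int → List Int) (l : List Int) (s0 : PySem.Set Int) (h : s0.Nodup) :
    (l.foldl (fun s j => PySem.Set.inter s (g j)) s0).Nodup := by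
  induction l generalizing s0 with
  | nil => exact h
  | cons a r ih => exact ih _ (PySem.Set.nodup_inter _ _ h)

-- a matching slice is the same thing as every token matching at its shifted position
theorem slice_eq_iff_tokens (text p : List String) (x : Int) (hx : 0 ≤ x)
    (hb : x + (p.length : Int) ≤ (text.length : Int)) :
    PySem.List.slice text (some x) (some (x + (p.length : Int))) = p ↔
      ∀ j : Int, 0 ≤ j → j < (p.length : Int) →
        PySem.List.pyGetD text (x + j) "" = PySem.List.pyGetD p j "" := by
  rw [PySem.List.slice_toNat text hx (by omega)]
  have hxm : (x + (p.length : Int)).toNat - x.toNat = p.length := by omega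
  rw [hxm]
  constructor
  · intro he j hj0 hjm
    have hjn : j.toNat < p.length := by omega
    have hxj : x.toNat + j.toNat < text.length := by omega
    have hgj : text[x.toNat + j.toNat]? = p[j.toNat]? := by
      have := congrArg (fun l => l[j.toNat]?) he
      simpa [List.getElem?_take, List.getElem?_drop, hjn] using this
    rw [List.getElem?_eq_getElem hxj, List.getElem?_eq_getElem hjn] at hgj
    rw [PySem.List.pyGetD_eq_getElem text "" (by omega) (by omega),
        PySem.List.pyGetD_eq_getElem p "" hj0 (by omega)]
    have e3 : (x + j).toNat = x.toNat + j.toNat := by omega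
    simp only [e3]
    exact Option.some.inj hgj
  · intro hall
    apply List.ext_getElem
    · simp only [List.length_take, List.length_drop]; omega
    · intro k h1 h2
      have hk : k < p.length := h2
      have hxk : x.toNat + k < text.length := by omega
      rw [List.getElem_take, List.getElem_drop]
      have := hall (k : Int) (by omega) (by omega)
      rw [PySem.List.pyGetD_eq_getElem text "" (by omega) (by omega),
          PySem.List.pyGetD_eq_getElem p "" (by omega) (by omega)] at this
      have e3 : (x + (k : Int)).toNat = x.toNat + k := by omega
      have e4 : ((k : Int)).toNat = k := by omega
      simp only [e3, e4] at this
      exact this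

-- B's intersected candidate set has exactly the occurrence starts as members
theorem mem_cand (text p : List String) (hp : p ≠ []) (x : Int) :
    (x ∈ (PySem.List.pyRange 1 (p.length : Int) 1).foldl
        (fun cand j => PySem.Set.inter cand
          (PySem.Set.ofList ((((PySem.List.enumerate text 0).foldl
            (fun d q => PySem.Dict.modify d q.2 ([] : List Int) (· ++ [q.1])) PySem.Dict.empty).getD
              (PySem.List.pyGetD p j "") []).map (· - j))))
        (PySem.Set.ofList (((PySem.List.enumerate text 0).foldl
          (fun d q => PySem.Dict.modify d q.2 ([] : List Int) (· ++ [q.1])) PySem.Dict.empty).getD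
            (PySem.List.pyGetD p 0 "") [])))
    ↔ x ∈ occIdx text p 0 := by
  have hm : (1 : Int) ≤ (p.length : Int) := by
    have : p.length ≠ 0 := fun h => hp (List.eq_nil_of_length_eq_zero h)
    omega
  rw [mem_foldl_inter, PySem.Set.mem_ofList, mem_index, mem_occIdx]
  constructor
  · rintro ⟨⟨h00, h0n, h0e⟩, hall⟩
    have hP : ∀ j : Int, 1 ≤ j → j < (p.length : Int) →
        (0 ≤ x + j ∧ x + j < (text.length : Int) ∧
          PySem.List.pyGetD text (x + j) "" = PySem.List.pyGetD p j "") := by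
      intro j hj1 hjm
      have hx' := hall j (PySem.List.mem_pyRange_one.2 ⟨hj1, hjm⟩)
      rw [PySem.Set.mem_ofList, List.mem_map] at hx'
      obtain ⟨y, hy, hyx⟩ := hx'
      rw [mem_index] at hy
      have e : y = x + j := by omega
      rw [e] at hy
      exact hy
    have hbnd : x + (p.length : Int) ≤ (text.length : Int) := by
      by_cases h1m : (1 : Int) < (p.length : Int)
      · have := hP ((p.length : Int) - 1) (by omega) (by omega)
        omega
      · omega
    refine ⟨⟨h00, by omega⟩, ?_⟩
    rw [slice_eq_iff_tokens text p x h00 hbnd]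
    intro j hj0 hjm
    rcases eq_or_lt_of_le hj0 with he | hpos
    · rw [← he]
      simpa using h0e
    · exact (hP j (by omega) hjm).2.2
  · rintro ⟨⟨h00, hlt⟩, hsl⟩
    have hbnd : x + (p.length : Int) ≤ (text.length : Int) := by omega
    rw [slice_eq_iff_tokens text p x h00 hbnd] at hsl
    constructor
    · exact ⟨h00, by omega, by simpa using hsl 0 le_rfl hm⟩
    · intro j hj
      have hjr := PySem.List.mem_pyRange_one.1 hj
      rw [PySem.Set.mem_ofList, List.mem_map]
      exact ⟨x + j, (mem_index text _ _).2 ⟨by omega, by omega, hsl j (by omega) hjr.2⟩, by omega⟩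

-- sorting B's candidate set yields exactly A's occurrence list
theorem sorted_cand_eq (text p : List String) (hp : p ≠ []) :
    PySem.List.sorted
      ((PySem.List.pyRange 1 (p.length : Int) 1).foldl
        (fun cand j => PySem.Set.inter cand
          (PySem.Set.ofList ((((PySem.List.enumerate text 0).foldl
            (fun d q => PySem.Dict.modify d q.2 ([] : List Int) (· ++ [q.1])) PySem.Dict.empty).getD
              (PySem.List.pyGetD p j "") []).map (· - j))))
        (PySem.Set.ofList (((PySem.List.enumerate text 0).foldl
          (fun d q => PySem.Dict.modify d q.2 ([] : List Int) (· ++ [q.1])) PySem.Dict.empty).getD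
            (PySem.List.pyGetD p 0 "") [])))
      (fun x => x) false = occIdx text p 0 := by
  apply PySem.List.sorted_eq_of_perm_of_pairwise_lt
  · apply (List.perm_ext_iff_of_nodup ?_ ?_).2
    · intro x
      rw [mem_cand text p hp x]
    · exact List.Nodup.filter _ (PySem.List.nodup_pyRange_one 0 _)
    · exact nodup_foldl_inter _ _ _ (PySem.Set.nodup_ofList _)
  · exact List.Pairwise.filter _ (PySem.List.pairwise_lt_pyRange_one 0 _)

-- === the shape of the found intervals ===

theorem gsel_shape (m : Int) (l : List Int) :
    ∀ (nf : Int) (x : List Int), x ∈ gsel m nf l → ∃ a ∈ l, x = [a, a + m] := by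
  induction l with
  | nil => intro nf x hx; simp [gsel] at hx
  | cons i r ih =>
    intro nf x hx
    simp only [gsel] at hx
    split at hx
    · rcases List.mem_cons.1 hx with h | h
      · exact ⟨i, by simp, h⟩
      · obtain ⟨a, ha, he⟩ := ih _ _ h
        exact ⟨a, by simp [ha], he⟩
    · obtain ⟨a, ha, he⟩ := ih _ _ hx
      exact ⟨a, by simp [ha], he⟩

theorem pyGetD_pair_zero (a b : Int) : PySem.List.pyGetD [a, b] 0 0 = a := rfl
theorem pyGetD_pair_one (a b : Int) : PySem.List.pyGetD [a, b] 1 0 = b := rfl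

-- === the mask loop characterised ===

def maskStep : List Bool → List Int → List Bool := fun keep it =>
  match it with
  | [a, b] => (PySem.List.pyRange a b 1).foldl (fun kp i => kp.set i.toNat false) keep
  | _ => keep

theorem mask_range_getElem? (a b : Int) (ha : 0 ≤ a) (kp : List Bool) (j : Nat) :
    ((PySem.List.pyRange a b 1).foldl (fun kp i => kp.set i.toNat false) kp)[j]?
      = kp[j]?.map (fun v => v && !(decide (a ≤ (j : Int) ∧ (j : Int) < b))) := by
  by_cases hab : a < b
  · rw [PySem.List.pyRange_one_cons hab]
    simp only [List.foldl_cons]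
    rw [mask_range_getElem? (a + 1) b (by omega) (kp.set a.toNat false) j]
    by_cases hj : j < kp.length
    · rw [List.getElem?_eq_getElem (by simpa using hj), List.getElem?_eq_getElem hj]
      simp only [Option.map_some, Option.some.injEq, List.getElem_set]
      by_cases he : a.toNat = j
      · have h1 : (a ≤ (j : Int) ∧ (j : Int) < b) := ⟨by omega, by omega⟩
        have h2 : ¬ (a + 1 ≤ (j : Int) ∧ (j : Int) < b) := by omega
        simp [he, h1]
      · have h12 : (a + 1 ≤ (j : Int) ∧ (j : Int) < b) ↔ (a ≤ (j : Int) ∧ (j : Int) < b) := by omega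
        simp only [if_neg he, h12]
    · rw [List.getElem?_eq_none (by simpa using not_lt.1 hj),
          List.getElem?_eq_none (not_lt.1 hj)]
      rfl
  · rw [PySem.List.pyRange_one_eq_nil (by omega)]
    have h0 : ¬ (a ≤ (j : Int) ∧ (j : Int) < b) := by omega
    simp [h0]
termination_by (b - a).toNat
decreasing_by omega

theorem mask_fold_getElem? (F : List (List Int)) (hF : ∀ it ∈ F, ∃ a b : Int, it = [a, b] ∧ 0 ≤ a)
    (kp : List Bool) (j : Nat) :
    (F.foldl maskStep kp)[j]?
      = kp[j]?.map (fun v => v && !(decide ((j : Int) ∈ F.flatMap (fun it =>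
          PySem.List.pyRange (PySem.List.pyGetD it 0 0) (PySem.List.pyGetD it 1 0) 1)))) := by
  induction F generalizing kp with
  | nil =>
    simp only [List.foldl_nil, List.flatMap_nil, List.not_mem_nil, decide_false, Bool.not_false, Bool.and_true]
    cases kp[j]? <;> rfl
  | cons it r ih =>
    obtain ⟨a, b, rfl, ha⟩ := hF it (by simp)
    simp only [List.foldl_cons, List.flatMap_cons]
    rw [ih (fun y hy => hF y (by simp [hy]))]
    show ((PySem.List.pyRange a b 1).foldl (fun kp i => kp.set i.toNat false) kp)[j]?.map _ = _
    rw [mask_range_getElem? a b ha kp j]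
    cases hkj : kp[j]? with
    | none => rfl
    | some v =>
      simp only [Option.map_some, pyGetD_pair_zero, pyGetD_pair_one, List.mem_append,
        PySem.List.mem_pyRange_one]
      congr 1
      by_cases h1 : a ≤ (j : Int) ∧ (j : Int) < b <;>
        by_cases h2 : (j : Int) ∈ r.flatMap (fun it =>
          PySem.List.pyRange (PySem.List.pyGetD it 0 0) (PySem.List.pyGetD it 1 0) 1) <;>
        simp [h1, h2]

-- the mask as a map over the index range
theorem mask_fold_eq_map (F : List (List Int)) (hF : ∀ it ∈ F, ∃ a b : Int, it = [a, b] ∧ 0 ≤ a)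
    (n : Nat) :
    F.foldl maskStep (List.replicate n true)
      = (PySem.List.pyRange 0 (n : Int) 1).map (fun i => !(decide (i ∈ F.flatMap (fun it =>
          PySem.List.pyRange (PySem.List.pyGetD it 0 0) (PySem.List.pyGetD it 1 0) 1)))) := by
  apply List.ext_getElem?
  intro j
  rw [mask_fold_getElem? F hF]
  by_cases hj : j < n
  · rw [List.getElem?_eq_getElem (by simpa using hj)]
    rw [List.getElem?_eq_getElem (by simp only [List.length_map, PySem.List.length_pyRange_one]; omega)]
    simp only [List.getElem_replicate, Option.map_some, List.getElem_map,
      PySem.List.getElem_pyRange_one, Bool.true_and, zero_add]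
  · rw [List.getElem?_eq_none (by simpa using not_lt.1 hj)]
    rw [List.getElem?_eq_none (by rw [List.length_map, PySem.List.length_pyRange_one]; omega)]
    rfl

-- === membership in A's flattened removing-indices list ===

-- the whole equivalence
theorem remove_patterns_eq (text : List String) (patterns : List (List String))
    (hpre : [] ∉ patterns) : remove_patterns text patterns = remove_patterns_alt text patterns := by
  unfold remove_patterns remove_patterns_alt
  simp only [Int.toNat_natCast]
  set S := PySem.List.sorted patterns (fun p => (p.length : Int)) true with hS
  have hne : ∀ p ∈ S, p ≠ [] := by
    intro p hp h
    exact hpre (h ▸ (PySem.List.mem_sorted patterns _ true p).1 hp)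
  -- the two found-folds compute the same list
  have hfold : S.foldl (fun acc pattern =>
      if (find_pattern text pattern).length > 0 then acc ++ find_pattern text pattern else acc) [] =
    S.foldl (fun (found : List (List Int)) pattern =>
      ((PySem.List.sorted
        ((PySem.List.pyRange 1 (pattern.length : Int) 1).foldl
          (fun cand j => PySem.Set.inter cand
            (PySem.Set.ofList ((((PySem.List.enumerate text 0).foldl
              (fun d q => PySem.Dict.modify d q.2 ([] : List Int) (· ++ [q.1])) PySem.Dict.empty).getD
                (PySem.List.pyGetD pattern j "") []).map (· - j))))
          (PySem.Set.ofList (((PySem.List.enumerate text 0).foldl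
            (fun d q => PySem.Dict.modify d q.2 ([] : List Int) (· ++ [q.1])) PySem.Dict.empty).getD
              (PySem.List.pyGetD pattern 0 "") [])))
        (fun x => x) false).foldl
        (fun (st : List (List Int) × Int) i =>
          if st.2 ≤ i then (st.1 ++ [[i, i + (pattern.length : Int)]], i + (pattern.length : Int)) else st)
        (found, 0)).1) [] := by
    apply PySem.List.foldl_congr_mem
    intro acc p hp
    rw [gsel_acc, sorted_cand_eq text p (hne p hp), ← find_pattern_eq text p (hne p hp)]
    split
    · rfl
    · next h =>
      have : find_pattern text p = [] := by
        cases hfp : find_pattern text p with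
        | nil => rfl
        | cons y ys => rw [hfp] at h; simp at h
      rw [this, List.append_nil]
  rw [← hfold]
  set F := List.foldl (fun acc pattern =>
      if (find_pattern text pattern).length > 0 then acc ++ find_pattern text pattern else acc) [] S with hFdef
  -- every interval in F is a two-element list [a, a+m] with 0 ≤ a
  have hFsh : ∀ it ∈ F, ∃ a b : Int, it = [a, b] ∧ 0 ≤ a := by
    rw [hFdef]
    have gen : ∀ (S' : List (List String)) (acc : List (List Int)),
        (∀ p ∈ S', p ≠ []) →
        (∀ it ∈ acc, ∃ a b : Int, it = [a, b] ∧ 0 ≤ a) →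
        ∀ it ∈ List.foldl (fun acc pattern =>
          if (find_pattern text pattern).length > 0 then acc ++ find_pattern text pattern else acc)
          acc S', ∃ a b : Int, it = [a, b] ∧ 0 ≤ a := by
      intro S'
      induction S' with
      | nil => intro acc _ hacc it hit; exact hacc it hit
      | cons p r ih =>
        intro acc hne' hacc it hit
        simp only [List.foldl_cons] at hit
        refine ih _ (fun q hq => hne' q (by simp [hq])) ?_ it hit
        intro y hy
        split at hy
        · rcases List.mem_append.1 hy with h | h
          · exact hacc y h
          · rw [find_pattern_eq text p (hne' p (by simp))] at h
            obtain ⟨a, ha, he⟩ := gsel_shape _ _ _ y h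
            have := ((mem_occIdx text p 0 a).1 ha).1.1
            exact ⟨a, a + (p.length : Int), he, this⟩
        · exact hacc y hy
    exact gen S [] hne (by simp)
  -- second components are equal; reduce to the first components
  simp only [Prod.mk.injEq]
  refine ⟨?_, trivial⟩
  set RL := List.foldl
      (fun (acc : List Int) it => acc ++ PySem.List.pyRange (PySem.List.pyGetD it 0 0) (PySem.List.pyGetD it 1 0) 1)
      [] F with hRL
  have hRLflat : RL = F.flatMap (fun it =>
      PySem.List.pyRange (PySem.List.pyGetD it 0 0) (PySem.List.pyGetD it 1 0) 1) := by
    rw [hRL, PySem.List.foldl_append_eq_flatMap]; rfl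
  -- A's loop keeps two accumulators; only the text one is returned
  have hpair : ∀ (l : List Int) (acc1 : List Int) (acc2 : List String),
      (l.foldl (fun (st : List Int × List String) i =>
        if (!RL.contains i) = true then (st.1 ++ [i], st.2 ++ [PySem.List.pyGetD text i ""]) else st)
        (acc1, acc2)).2
      = acc2 ++ (l.filter (fun i => !RL.contains i)).map (fun i => PySem.List.pyGetD text i "") := by
    intro l
    induction l with
    | nil => intro acc1 acc2; simp
    | cons x r ih =>
      intro acc1 acc2
      simp only [List.foldl_cons, List.filter_cons]
      by_cases h : (!RL.contains x) = true
      · rw [if_pos h, if_pos h, ih]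
        simp
      · rw [if_neg h, if_neg h, ih]
  rw [hpair]
  -- B's side: zip with the mask, then filter/map
  have hmask : F.foldl maskStep (List.replicate text.length true)
      = (PySem.List.pyRange 0 (text.length : Int) 1).map (fun i => !(RL.contains i)) := by
    rw [mask_fold_eq_map F hFsh text.length, hRLflat]
    apply List.map_congr_left
    intro i _
    congr 1
    exact (Bool.eq_iff_iff).2 (by simp)
  show _ = ((text.zip (F.foldl _ _)).filter _).map _
  have hstep : (F.foldl (fun keep it =>
      match it with
      | [a, b] => (PySem.List.pyRange a b 1).foldl (fun kp i => kp.set i.toNat false) keep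
      | _ => keep) (List.replicate text.length true)) = F.foldl maskStep (List.replicate text.length true) := rfl
  rw [hstep, hmask]
  set R := PySem.List.pyRange 0 (text.length : Int) 1 with hRdef
  have htext : text = R.map (fun i => PySem.List.pyGetD text i "") := by
    rw [hRdef, PySem.List.map_pyGetD_pyRange_zero']
  conv_rhs => rw [htext]
  rw [List.zip_map', List.filter_map, List.map_map]
  simp only [Function.comp_def, List.nil_append]

-- ===== VERDICT (by name: the statement is the Claim_ definition above) =====
theorem remove_patterns_spec : Claim_equal_remove_patterns := by
  intro text patterns _ hpre
  exact remove_patterns_eq text patterns hpre
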